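-- pv_equiv track=rewrite | github.com/kianush00/Graphsearch | jupyter/srex_new_classes.py | __process_boolean_tokens_delete_not_expressions
-- ===== SOURCE A (Python) =====
-- def __process_boolean_tokens_delete_not_expressions(tokens: list[str]) -> list[str]:
--     indices_to_exclude = []
--     index = 0
--
--     while index < len(tokens):
--         next_index = index + 1
--         if tokens[index] == 'NOT':
--             stack = 0
--             while next_index < len(tokens):
--                 if tokens[next_index] == '(':
--                     stack += 1
--                 elif tokens[next_index] == ')':
--                     if stack < 2: # if it is the last closing parenthesis, or there's no opening parenthesis between the 2 indices
--                         if stack == 1: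
--                             next_index += 1     # removes the closing parenthesis if there was an opening parenthesis before
--                         break
--                     else:
--                         stack -= 1
--                 elif tokens[next_index] in ['AND', 'OR', 'NOT']:
--                     if stack < 1:   # if there was no opening parenthesis between the two indices
--                         break
--                 next_index += 1
--             indices_to_exclude.extend(range(index, next_index))  # add the indexes to delete their values
--         index = next_index
--
--     processed_tokens = [token for index, token in enumerate(tokens) if index not in indices_to_exclude]
--     return processed_tokens
-- ===== SOURCE B (Python) =====
-- def __process_boolean_tokens_delete_not_expressions(tokens: list[str]) -> list[str]:
--     result = []
--     index = 0
--     while index < len(tokens):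
--         if tokens[index] != 'NOT':
--             result.append(tokens[index])
--             index += 1
--             continue
--         # skip the whole NOT subexpression: same span scan as the original
--         next_index = index + 1
--         stack = 0
--         while next_index < len(tokens):
--             if tokens[next_index] == '(':
--                 stack += 1
--             elif tokens[next_index] == ')':
--                 if stack < 2:
--                     if stack == 1:
--                         next_index += 1
--                     break
--                 else:
--                     stack -= 1
--             elif tokens[next_index] in ['AND', 'OR', 'NOT']:
--                 if stack < 1:
--                     break
--             next_index += 1
--         index = next_index
--     return result
-- ===== Notes on version B (the rewrite author's own statement) =====
-- stated objective: simpler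
-- what changed: Replaced A's two-phase structure (collect all excluded indices into a list, then filter tokens by list membership in a final enumerate comprehension) with a single pass that appends non-NOT tokens directly and jumps over each NOT-span, keeping no index list and no second pass.
import Mathlib
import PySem

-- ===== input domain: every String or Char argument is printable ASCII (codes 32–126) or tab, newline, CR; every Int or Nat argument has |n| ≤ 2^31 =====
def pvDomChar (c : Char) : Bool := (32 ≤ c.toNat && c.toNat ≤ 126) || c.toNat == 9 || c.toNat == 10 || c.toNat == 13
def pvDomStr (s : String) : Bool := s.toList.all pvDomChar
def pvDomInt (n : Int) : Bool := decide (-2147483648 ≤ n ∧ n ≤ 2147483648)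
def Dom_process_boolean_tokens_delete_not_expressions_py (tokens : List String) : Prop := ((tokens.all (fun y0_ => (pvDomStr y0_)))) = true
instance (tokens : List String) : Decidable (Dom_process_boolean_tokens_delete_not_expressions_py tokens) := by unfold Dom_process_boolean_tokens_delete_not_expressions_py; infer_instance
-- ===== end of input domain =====

-- B builds the result in one direct pass (skip NOT-spans, append everything else),
-- replacing A's two phases (collect excluded indices, then filter by membership): simpler, one traversal.
-- Loops are ported with a fuel counter (tokens.length bounds the inner scan, tokens.length+1 the outer walk) purely to make them total.


-- ===== PORT A =====
-- inner while loop (identical source code in A and in B): scans the span of a NOT subexpression.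
-- next_index strictly increases and the loop stops at tokens.length, so fuel = tokens.length (passed at the call
-- site, where next_index ≥ 1) is always enough; tokens[next_index] is guarded by next_index < len, so getD is exact
def pvNotSpan (tokens : List String) (fuel : Nat) (next_index : Nat) (stack : Nat) : Nat :=
  match fuel with
  | 0 => next_index
  | fuel + 1 =>
    if next_index < tokens.length then
      if tokens.getD next_index "" = "(" then pvNotSpan tokens fuel (next_index + 1) (stack + 1)
      else if tokens.getD next_index "" = ")" then
        if stack < 2 then (if stack = 1 then next_index + 1 else next_index)
        else pvNotSpan tokens fuel (next_index + 1) (stack - 1)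
      else if tokens.getD next_index "" = "AND" ∨ tokens.getD next_index "" = "OR" ∨ tokens.getD next_index "" = "NOT" then
        (if stack < 1 then next_index else pvNotSpan tokens fuel (next_index + 1) stack)
      else pvNotSpan tokens fuel (next_index + 1) stack
    else next_index

-- A's outer while loop: accumulates indices_to_exclude; index strictly increases each
-- iteration, so fuel = tokens.length + 1 is always enough
def pyALoop (tokens : List String) (fuel : Nat) (index : Nat) (excl : List Nat) : List Nat :=
  match fuel with
  | 0 => excl
  | fuel + 1 =>
    if index < tokens.length then
      if tokens.getD index "" = "NOT" then
        let next_index := pvNotSpan tokens tokens.length (index + 1) 0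
        pyALoop tokens fuel next_index (excl ++ List.range' index (next_index - index))
      else
        pyALoop tokens fuel (index + 1) excl
    else excl

-- A's final comprehension: [token for index, token in enumerate(tokens) if index not in indices_to_exclude]
def pyAFilter (tokens : List String) (excl : List Nat) (j : Nat) : List String :=
  match tokens with
  | [] => []
  | t :: rest => if j ∈ excl then pyAFilter rest excl (j + 1) else t :: pyAFilter rest excl (j + 1)

def process_boolean_tokens_delete_not_expressions_py (tokens : List String) : List String :=
  pyAFilter tokens (pyALoop tokens (tokens.length + 1) 0 []) 0

-- ===== PORT B =====
-- B's single pass: append non-NOT tokens, jump over NOT spans (same fuel bound as A's outer loop)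
def pyBLoop (tokens : List String) (fuel : Nat) (index : Nat) : List String :=
  match fuel with
  | 0 => []
  | fuel + 1 =>
    if index < tokens.length then
      if tokens.getD index "" ≠ "NOT" then
        tokens.getD index "" :: pyBLoop tokens fuel (index + 1)
      else
        pyBLoop tokens fuel (pvNotSpan tokens tokens.length (index + 1) 0)
    else []

def process_boolean_tokens_delete_not_expressions_py_alt (tokens : List String) : List String :=
  pyBLoop tokens (tokens.length + 1) 0

-- ===== PRECONDITION & SPEC =====
def Spec_process_boolean_tokens_delete_not_expressions_py (tokens : List String) (out : List String) : Prop := out = process_boolean_tokens_delete_not_expressions_py_alt tokens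
instance (tokens : List String) (out : List String) : Decidable (Spec_process_boolean_tokens_delete_not_expressions_py tokens out) := by unfold Spec_process_boolean_tokens_delete_not_expressions_py; infer_instance

-- ===== CLAIM (what is proved, stated in full; the proofs are below) =====
def Claim_equal_process_boolean_tokens_delete_not_expressions_py : Prop := ∀ (tokens : List String), Dom_process_boolean_tokens_delete_not_expressions_py tokens → Spec_process_boolean_tokens_delete_not_expressions_py tokens (process_boolean_tokens_delete_not_expressions_py tokens)

-- ===== LEMMAS AND PROOFS =====

-- the span start is a lower bound of its result
theorem pvNotSpan_ge (tokens : List String) (fuel i s : Nat) : i ≤ pvNotSpan tokens fuel i s := by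
  induction fuel generalizing i s with
  | zero => simp [pvNotSpan]
  | succ f ih =>
    simp only [pvNotSpan]
    split_ifs <;> first | omega | exact le_trans (by omega) (ih _ _)

-- the span result never passes the end of the token list
theorem pvNotSpan_le (tokens : List String) (fuel i s : Nat) (h : i ≤ tokens.length) :
    pvNotSpan tokens fuel i s ≤ tokens.length := by
  induction fuel generalizing i s with
  | zero => simpa [pvNotSpan] using h
  | succ f ih =>
    simp only [pvNotSpan]
    split_ifs <;> first | omega | exact ih _ _ (by omega)

-- the accumulator of A's loop is a prefix of the result
theorem pyALoop_acc (tokens : List String) (fuel : Nat) :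
    ∀ (i : Nat) (excl : List Nat), pyALoop tokens fuel i excl = excl ++ pyALoop tokens fuel i [] := by
  induction fuel with
  | zero => intro i excl; simp [pyALoop]
  | succ f ih =>
    intro i excl
    by_cases hlt : i < tokens.length
    · by_cases hnot : tokens.getD i "" = "NOT"
      · simp only [pyALoop, if_pos hlt, if_pos hnot]
        rw [ih _ (excl ++ List.range' i _), ih _ ([] ++ List.range' i _)]
        simp [List.append_assoc]
      · simp only [pyALoop, if_pos hlt, if_neg hnot]
        exact ih (i + 1) excl
    · simp [pyALoop, if_neg hlt]

-- every excluded index is ≥ the loop's starting index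
theorem pyALoop_ge (tokens : List String) (fuel : Nat) :
    ∀ (i k : Nat), k ∈ pyALoop tokens fuel i [] → i ≤ k := by
  induction fuel with
  | zero => intro i k hk; simp [pyALoop] at hk
  | succ f ih =>
    intro i k hk
    by_cases hlt : i < tokens.length
    · by_cases hnot : tokens.getD i "" = "NOT"
      · rw [pyALoop, if_pos hlt, if_pos hnot] at hk
        have hspan := pvNotSpan_ge tokens tokens.length (i + 1) 0
        rw [pyALoop_acc] at hk
        simp only [List.nil_append, List.mem_append, List.mem_range'_1] at hk
        rcases hk with hk | hk
        · omega
        · have := ih _ k hk; omega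
      · rw [pyALoop, if_pos hlt, if_neg hnot] at hk
        have := ih (i + 1) k hk; omega
    · rw [pyALoop, if_neg hlt] at hk
      simp at hk

-- the filter only consults membership of indices ≥ its counter
theorem pyAFilter_congr (tokens : List String) (excl excl' : List Nat) (j : Nat)
    (h : ∀ k, j ≤ k → (k ∈ excl ↔ k ∈ excl')) :
    pyAFilter tokens excl j = pyAFilter tokens excl' j := by
  induction tokens generalizing j with
  | nil => rfl
  | cons t rest ih =>
    simp only [pyAFilter]
    rw [ih (j + 1) (fun k hk => h k (by omega))]
    by_cases hj : j ∈ excl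
    · rw [if_pos hj, if_pos ((h j (le_refl j)).mp hj)]
    · rw [if_neg hj, if_neg (fun c => hj ((h j (le_refl j)).mpr c))]

-- a block of consecutive excluded indices is skipped wholesale by the filter
theorem pyAFilter_skip (tokens : List String) (excl : List Nat) (i n : Nat)
    (hin : i ≤ n) (hn : n ≤ tokens.length)
    (hmem : ∀ k, i ≤ k → k < n → k ∈ excl) :
    pyAFilter (tokens.drop i) excl i = pyAFilter (tokens.drop n) excl n := by
  rcases Nat.lt_or_ge i n with hlt | hge
  · have hi : i < tokens.length := by omega
    have hdrop : tokens.drop i = tokens[i] :: tokens.drop (i + 1) :=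
      List.drop_eq_getElem_cons hi
    rw [hdrop]
    simp only [pyAFilter]
    rw [if_pos (hmem i (le_refl i) hlt)]
    exact pyAFilter_skip tokens excl (i + 1) n (by omega) hn (fun k h1 h2 => hmem k (by omega) h2)
  · have : i = n := by omega
    subst this; rfl
termination_by n - i

-- main invariant: filtering the suffix from i against A's exclusions from i gives B's pass from i
theorem main_inv (tokens : List String) (fuel : Nat) :
    ∀ (i : Nat), tokens.length - i < fuel →
      pyAFilter (tokens.drop i) (pyALoop tokens fuel i []) i = pyBLoop tokens fuel i := by
  induction fuel with
  | zero => intro i h; omega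
  | succ f ih =>
    intro i h
    by_cases hlt : i < tokens.length
    · rw [pyALoop, if_pos hlt, pyBLoop, if_pos hlt]
      by_cases hnot : tokens.getD i "" = "NOT"
      · rw [if_pos hnot, if_neg (by simpa using hnot)]
        have hspan := pvNotSpan_ge tokens tokens.length (i + 1) 0
        have hnl : pvNotSpan tokens tokens.length (i + 1) 0 ≤ tokens.length :=
          pvNotSpan_le tokens tokens.length (i + 1) 0 (by omega)
        set n := pvNotSpan tokens tokens.length (i + 1) 0 with hdefn
        rw [pyALoop_acc]
        simp only [List.nil_append]
        rw [pyAFilter_skip tokens _ i n (by omega) hnl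
              (fun k h1 h2 => by
                simp only [List.mem_append, List.mem_range'_1]; left; omega)]
        rw [pyAFilter_congr (tokens.drop n) _ (pyALoop tokens f n []) n
              (fun k hk => by
                simp only [List.mem_append, List.mem_range'_1]
                constructor
                · rintro (hc | hc)
                  · omega
                  · exact hc
                · exact fun hc => Or.inr hc)]
        exact ih n (by omega)
      · rw [if_neg hnot, if_pos (by simpa using hnot)]
        have hdrop : tokens.drop i = tokens[i] :: tokens.drop (i + 1) :=
          List.drop_eq_getElem_cons hlt
        rw [hdrop]
        simp only [pyAFilter]
        rw [if_neg (fun c => by have := pyALoop_ge tokens f (i + 1) i c; omega)]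
        rw [ih (i + 1) (by omega)]
        congr 1
        exact (List.getD_eq_getElem tokens "" hlt).symm
    · rw [pyALoop, if_neg hlt, pyBLoop, if_neg hlt, List.drop_eq_nil_of_le (by omega)]
      rfl

-- ===== VERDICT (by name: the statement is the Claim_ definition above) =====
theorem process_boolean_tokens_delete_not_expressions_py_spec : Claim_equal_process_boolean_tokens_delete_not_expressions_py := by
  intro tokens _
  show process_boolean_tokens_delete_not_expressions_py tokens = process_boolean_tokens_delete_not_expressions_py_alt tokens
  unfold process_boolean_tokens_delete_not_expressions_py process_boolean_tokens_delete_not_expressions_py_alt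
  simpa using main_inv tokens (tokens.length + 1) 0 (by omega)
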